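-- pv_equiv track=rewrite | github.com/hocaoglumf/Modeling-Simulation | DistributionFitANN/NormalDistDataGeneration.py | SeriKontrol
-- ===== SOURCE A (Python) =====
-- def SeriKontrol(data):
--     mn=min(data)
--     mx=max(data)
--     mlt=1
--     newData=data
--     while (mx-mn)/10 <=5:
--         newData=[]
--         mlt *=10
--         for i in data:
--             newData.append(i*mlt)
--         mn=min(newData)
--         mx=max(newData)
--     return newData,mlt
-- ===== SOURCE B (Python) =====
-- def SeriKontrol(data):
--     # Find the needed power-of-10 multiplier from the range alone, then scale once.
--     r = max(data) - min(data)
--     mlt = 1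
--     while r * mlt <= 50:
--         mlt *= 10
--     return [i * mlt for i in data], mlt
-- ===== Notes on version B (the rewrite author's own statement) =====
-- stated objective: simpler
-- what changed: B derives the power-of-10 multiplier from the scalar range alone and scales the list once, instead of A's rebuilding the list and re-scanning it for min/max on every tenfold step.
import Mathlib
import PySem

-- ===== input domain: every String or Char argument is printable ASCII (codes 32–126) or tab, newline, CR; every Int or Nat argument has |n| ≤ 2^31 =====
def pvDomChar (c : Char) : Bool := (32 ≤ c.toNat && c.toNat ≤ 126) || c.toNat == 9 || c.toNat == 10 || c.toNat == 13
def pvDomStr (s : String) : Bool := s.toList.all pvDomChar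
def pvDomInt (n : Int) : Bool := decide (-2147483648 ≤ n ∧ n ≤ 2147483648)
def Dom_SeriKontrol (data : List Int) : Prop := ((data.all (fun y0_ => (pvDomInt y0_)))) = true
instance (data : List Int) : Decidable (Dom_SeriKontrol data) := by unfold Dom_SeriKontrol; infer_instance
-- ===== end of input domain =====

-- B simply derives the power-of-10 multiplier from the scalar range and scales once; A rebuilds and
-- re-scans the list each tenfold step. Equivalence is proved on Pre_ (min ≠ max: elsewhere A diverges
-- or, on the empty list, raises ValueError).

-- ===== PORT A =====
-- Python's `while (mx-mn)/10 <= 5` uses float division; on Pre_ the range tested is at most 500·2^32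
-- in magnitude so the float test is exact and equals `mx - mn ≤ 50`, which is how it is ported.
-- The while-loop is ported with a fuel guard (64 steps are more than the loop ever runs on Pre_,
-- where the range at least doubles... actually ×10 each step and starts ≥ 1, so ≤ 2 steps).
def seriLoop (data : List Int) (mn mx mlt : Int) (newData : List Int) (fuel : Nat) : List Int × Int :=
  match fuel with
  | 0 => (newData, mlt)
  | fuel + 1 =>
    if mx - mn ≤ 50 then
      let mlt' := mlt * 10
      let newData' := data.foldl (fun acc i => acc ++ [i * mlt']) []
      match PySem.List.min? newData' (fun y => y), PySem.List.max? newData' (fun y => y) with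
      | some mn', some mx' => seriLoop data mn' mx' mlt' newData' fuel
      | _, _ => ([], 1)   -- unreachable: newData' is nonempty whenever data is (Python would raise on empty data)
    else (newData, mlt)

def SeriKontrol (data : List Int) : List Int × Int :=
  match PySem.List.min? data (fun y => y), PySem.List.max? data (fun y => y) with
  | some mn, some mx => seriLoop data mn mx 1 data 64
  | _, _ => ([], 1)   -- empty data: Python min raises ValueError (outside Pre_)

-- ===== PORT B =====
-- `while r * mlt <= 50: mlt *= 10`, with the same fuel guard (≤ 2 iterations on Pre_).
def scaleLoop (r mlt : Int) (fuel : Nat) : Int :=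
  match fuel with
  | 0 => mlt
  | fuel + 1 => if r * mlt ≤ 50 then scaleLoop r (mlt * 10) fuel else mlt

def SeriKontrol_alt (data : List Int) : List Int × Int :=
  match PySem.List.min? data (fun y => y), PySem.List.max? data (fun y => y) with
  | some mn, some mx =>
    let mlt := scaleLoop (mx - mn) 1 64
    (data.map (fun i => i * mlt), mlt)
  | _, _ => ([], 1)   -- empty data: Python min raises ValueError (outside Pre_)

-- ===== PRECONDITION & SPEC =====
-- Pre_ excludes the empty list (A's min() raises ValueError) and constant lists (A's while-loop never
-- terminates there); B raises/diverges identically on those inputs.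
def Pre_SeriKontrol (data : List Int) : Prop :=
  PySem.List.min? data (fun y => y) ≠ PySem.List.max? data (fun y => y)
instance (data : List Int) : Decidable (Pre_SeriKontrol data) := by unfold Pre_SeriKontrol; infer_instance

def pvWitness_SeriKontrol : List Int := [1, 2, 3]

def Spec_SeriKontrol (data : List Int) (out : List Int × Int) : Prop := out = SeriKontrol_alt data
instance (data : List Int) (out : List Int × Int) : Decidable (Spec_SeriKontrol data out) := by unfold Spec_SeriKontrol; infer_instance

-- ===== CLAIM (what is proved, stated in full; the proofs are below) =====
def Claim_equal_SeriKontrol : Prop := ∀ (data : List Int), Dom_SeriKontrol data → Pre_SeriKontrol data → Spec_SeriKontrol data (SeriKontrol data)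

-- ===== LEMMAS AND PROOFS =====

theorem foldl_append_mul (m : Int) (data acc : List Int) :
    data.foldl (fun acc i => acc ++ [i * m]) acc = acc ++ data.map (fun i => i * m) := by
  induction data generalizing acc with
  | nil => simp
  | cons x t ih => simp [List.foldl, ih]

theorem min_mul_pos (a b c : Int) (hc : 0 < c) : min (a * c) (b * c) = min a b * c := by
  rcases le_total a b with h | h <;> simp [h, mul_le_mul_of_nonneg_right, hc.le]

theorem max_mul_pos (a b c : Int) (hc : 0 < c) : max (a * c) (b * c) = max a b * c := by
  rcases le_total a b with h | h <;> simp [h, mul_le_mul_of_nonneg_right, hc.le]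

theorem foldl_min_mul (c : Int) (hc : 0 < c) (t : List Int) (a : Int) :
    (t.map (fun i => i * c)).foldl min (a * c) = t.foldl min a * c := by
  induction t generalizing a with
  | nil => simp
  | cons x t ih => simp [List.foldl, min_mul_pos _ _ _ hc, ih]

theorem foldl_max_mul (c : Int) (hc : 0 < c) (t : List Int) (a : Int) :
    (t.map (fun i => i * c)).foldl max (a * c) = t.foldl max a * c := by
  induction t generalizing a with
  | nil => simp
  | cons x t ih => simp [List.foldl, max_mul_pos _ _ _ hc, ih]

theorem min?_map_mul (c : Int) (hc : 0 < c) (x : Int) (t : List Int) :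
    PySem.List.min? ((x :: t).map (fun i => i * c)) (fun y => y)
      = some (t.foldl min x * c) := by
  simp [List.map, PySem.List.min?_id_cons, foldl_min_mul c hc]

theorem max?_map_mul (c : Int) (hc : 0 < c) (x : Int) (t : List Int) :
    PySem.List.max? ((x :: t).map (fun i => i * c)) (fun y => y)
      = some (t.foldl max x * c) := by
  simp [List.map, PySem.List.max?_id_cons, foldl_max_mul c hc]

theorem scaleLoop_succ (r m : Int) (f : Nat) :
    scaleLoop r m (f + 1) = if r * m ≤ 50 then scaleLoop r (m * 10) f else m := rfl

theorem seriLoop_succ (data : List Int) (mn mx mlt : Int) (newData : List Int) (f : Nat) :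
    seriLoop data mn mx mlt newData (f + 1)
      = if mx - mn ≤ 50 then
          (match PySem.List.min? (data.foldl (fun acc i => acc ++ [i * (mlt * 10)]) []) (fun y => y),
                 PySem.List.max? (data.foldl (fun acc i => acc ++ [i * (mlt * 10)]) []) (fun y => y) with
           | some mn', some mx' =>
               seriLoop data mn' mx' (mlt * 10) (data.foldl (fun acc i => acc ++ [i * (mlt * 10)]) []) f
           | _, _ => ([], 1))
        else (newData, mlt) := rfl

-- ===== VERDICT (by name: the statement is the Claim_ definition above) =====
theorem SeriKontrol_spec : Claim_equal_SeriKontrol := by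
  intro data _ hpre
  unfold Spec_SeriKontrol
  match data with
  | [] => rfl
  | x :: t =>
    have hmn := PySem.List.min?_id_cons (x := x) (t := t)
    have hmx := PySem.List.max?_id_cons (x := x) (t := t)
    set mn := t.foldl min x with hmndef
    set mx := t.foldl max x with hmxdef
    have hle : mn ≤ mx := le_trans (PySem.List.foldl_min_le t x).1 (PySem.List.le_foldl_max t x).1
    have hne : mn ≠ mx := by
      intro h; apply hpre; rw [hmn, hmx, h]
    have hr : 1 ≤ mx - mn := by omega
    unfold SeriKontrol SeriKontrol_alt
    rw [hmn, hmx]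
    show seriLoop (x :: t) mn mx 1 (x :: t) 64
        = ((x :: t).map (fun i => i * scaleLoop (mx - mn) 1 64), scaleLoop (mx - mn) 1 64)
    by_cases h50 : mx - mn ≤ 50
    · -- at least one tenfold step
      have e1 : (x :: t).foldl (fun acc i => acc ++ [i * (1 * 10)]) [] = (x :: t).map (fun i => i * 10) := by
        rw [foldl_append_mul]; norm_num
      rw [show (64 : Nat) = 63 + 1 from rfl, seriLoop_succ, if_pos h50, e1,
          min?_map_mul 10 (by norm_num) x t, max?_map_mul 10 (by norm_num) x t]
      rw [← hmndef, ← hmxdef]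
      show seriLoop (x :: t) (mn * 10) (mx * 10) (1 * 10) ((x :: t).map (fun i => i * 10)) 63
          = ((x :: t).map (fun i => i * scaleLoop (mx - mn) 1 64), scaleLoop (mx - mn) 1 64)
      by_cases h5 : mx - mn ≤ 5
      · -- two steps: multiplier 100
        have e2 : (x :: t).foldl (fun acc i => acc ++ [i * (1 * 10 * 10)]) [] = (x :: t).map (fun i => i * 100) := by
          rw [foldl_append_mul]; norm_num
        have hs : scaleLoop (mx - mn) 1 64 = 100 := by
          rw [show (64 : Nat) = 62 + 1 + 1 from rfl, scaleLoop_succ, if_pos (by omega),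
              scaleLoop_succ, if_pos (by omega), show (62 : Nat) = 61 + 1 from rfl,
              scaleLoop_succ, if_neg (by omega)]; norm_num
        rw [show (63 : Nat) = 62 + 1 from rfl, seriLoop_succ,
            if_pos (show mx * 10 - mn * 10 ≤ 50 by omega), e2,
            min?_map_mul 100 (by norm_num) x t, max?_map_mul 100 (by norm_num) x t]
        rw [← hmndef, ← hmxdef]
        show seriLoop (x :: t) (mn * 100) (mx * 100) (1 * 10 * 10) ((x :: t).map (fun i => i * 100)) 62
            = ((x :: t).map (fun i => i * scaleLoop (mx - mn) 1 64), scaleLoop (mx - mn) 1 64)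
        rw [show (62 : Nat) = 61 + 1 from rfl, seriLoop_succ,
            if_neg (show ¬ (mx * 100 - mn * 100 ≤ 50) by omega), hs]
        norm_num
      · -- one step: multiplier 10
        have hs : scaleLoop (mx - mn) 1 64 = 10 := by
          rw [show (64 : Nat) = 63 + 1 from rfl, scaleLoop_succ, if_pos (by omega),
              show (63 : Nat) = 62 + 1 from rfl, scaleLoop_succ, if_neg (by omega)]; norm_num
        rw [show (63 : Nat) = 62 + 1 from rfl, seriLoop_succ,
            if_neg (show ¬ (mx * 10 - mn * 10 ≤ 50) by omega), hs]
        norm_num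
    · -- no step: multiplier 1
      have hs : scaleLoop (mx - mn) 1 64 = 1 := by
        rw [show (64 : Nat) = 63 + 1 from rfl, scaleLoop_succ, if_neg (by omega)]
      rw [show (64 : Nat) = 63 + 1 from rfl, seriLoop_succ, if_neg h50, hs]
      simp
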